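-- pv_equiv track=rewrite | github.com/Hsins/CodeWars | Python/6 kyu/Your Order, Please/solution.py | order
-- ===== SOURCE A (Python) =====
-- def order(sentence):
--     result = ''
--     words = sentence.split()
--
--     for _ in range(1, 10):
--         for word in words:
--             if word.count(str(_)) == 1:
--                 result += f'{word} '
--
--     return result[:-1]
-- ===== SOURCE B (Python) =====
-- def order(sentence):
--     buckets = [[] for _ in range(9)]
--     for w in sentence.split():
--         for d in range(1, 10):
--             if w.count(str(d)) == 1:
--                 buckets[d - 1].append(w)
--     return ' '.join(w for b in buckets for w in b)
-- ===== Notes on version B (the rewrite author's own statement) =====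
-- stated objective: alternative
-- what changed: One pass over the words fills nine digit-indexed buckets which are then flattened and space-joined, instead of A's nine full scans of the word list, each appending the matching word plus a space to a growing string that is finally stripped of its trailing character.
import Mathlib
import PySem

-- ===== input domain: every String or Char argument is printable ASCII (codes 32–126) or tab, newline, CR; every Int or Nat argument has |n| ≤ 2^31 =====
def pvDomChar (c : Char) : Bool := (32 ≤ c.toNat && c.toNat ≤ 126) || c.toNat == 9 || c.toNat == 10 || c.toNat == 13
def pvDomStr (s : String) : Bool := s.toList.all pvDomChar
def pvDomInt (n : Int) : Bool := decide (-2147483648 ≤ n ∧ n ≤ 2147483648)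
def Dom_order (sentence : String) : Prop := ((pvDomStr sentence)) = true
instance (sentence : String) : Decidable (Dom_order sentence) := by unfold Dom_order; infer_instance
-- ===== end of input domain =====

-- B fills nine digit-indexed buckets in one pass over the words and joins them, instead of A's nine
-- full scans of the word list each appending to a growing string.


-- ===== PORT A =====
def order (sentence : String) : String :=
  let words := PySem.Str.split₀ sentence
  let result := (PySem.List.pyRange 1 10 1).foldl
    (fun result d => words.foldl
      (fun result word =>
        if PySem.Str.count word (PySem.Int.toStr d) == 1 then result ++ (word ++ " ") else result)
      result)
    ""
  PySem.Str.slice result none (some (-1))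

-- ===== PORT B =====
def order_alt (sentence : String) : String :=
  let buckets := (PySem.Str.split₀ sentence).foldl
    (fun bs w => (PySem.List.pyRange 1 10 1).foldl
      (fun bs d =>
        if PySem.Str.count w (PySem.Int.toStr d) == 1 then bs.modify (d - 1).toNat (fun b => b ++ [w]) else bs)
      bs)
    (List.replicate 9 [])
  PySem.Str.join " " buckets.flatten

-- ===== PRECONDITION & SPEC =====
def Spec_order (sentence : String) (out : String) : Prop := out = order_alt sentence
instance (sentence : String) (out : String) : Decidable (Spec_order sentence out) := by unfold Spec_order; infer_instance

-- ===== CLAIM (what is proved, stated in full; the proofs are below) =====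
def Claim_equal_order : Prop := ∀ (sentence : String), Dom_order sentence → Spec_order sentence (order sentence)

-- ===== LEMMAS AND PROOFS =====

-- the per-digit match predicate both programs test
def pvP (d : Int) (w : String) : Bool := PySem.Str.count w (PySem.Int.toStr d) == 1

-- the words matching digit d, in word order
def pvSel (d : Int) (ws : List String) : List String := ws.filter (pvP d)

-- A's accumulation "w1 ++ ' ' ++ w2 ++ ' ' ++ …"
def pvCat : List String → String
  | [] => ""
  | w :: ws => w ++ " " ++ pvCat ws

theorem pvRange_eq : PySem.List.pyRange 1 10 1 = [1,2,3,4,5,6,7,8,9] := by decide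

theorem pvCat_append (a b : List String) : pvCat (a ++ b) = pvCat a ++ pvCat b := by
  induction a with
  | nil => simp [pvCat]
  | cons w a ih => simp [pvCat, ih, String.append_assoc]

-- A's inner loop over the words, for one digit
theorem order_inner (d : Int) (ws : List String) (res : String) :
    ws.foldl (fun r w => if PySem.Str.count w (PySem.Int.toStr d) == 1 then r ++ (w ++ " ") else r) res
      = res ++ pvCat (pvSel d ws) := by
  induction ws generalizing res with
  | nil => simp [pvSel, pvCat]
  | cons w ws ih =>
    simp only [List.foldl_cons]
    rw [ih]
    simp only [pvSel, pvP, List.filter_cons]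
    by_cases hc : (PySem.Str.count w (PySem.Int.toStr d) == 1) = true
    · simp only [if_pos hc, pvCat]
      simp [String.append_assoc]
    · simp only [if_neg hc]

-- A's outer loop over the digits
theorem order_outer (ds : List Int) (ws : List String) (res : String) :
    ds.foldl (fun r d => ws.foldl
        (fun r w => if PySem.Str.count w (PySem.Int.toStr d) == 1 then r ++ (w ++ " ") else r) r) res
      = res ++ pvCat ((ds.map (fun d => pvSel d ws)).flatten) := by
  induction ds generalizing res with
  | nil => simp [pvCat]
  | cons d ds ih =>
    rw [List.foldl_cons, order_inner, ih]
    simp [pvCat_append, String.append_assoc]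

theorem pvModifyId (bs : List (List String)) (k : Nat) : bs.modify k (fun b => b) = bs := by
  induction bs generalizing k with
  | nil => simp
  | cons a l ih => cases k with
    | zero => simp
    | succ k => simp only [List.modify_succ_cons, ih]

theorem pvIfModify (w : String) (c : Bool) (bs : List (List String)) (k : Nat) :
    (if c = true then bs.modify k (fun b => b ++ [w]) else bs)
      = bs.modify k (fun b => b ++ (if c = true then [w] else [])) := by
  cases c <;> simp [pvModifyId]

-- one word's pass through B's nine-digit inner loop
theorem alt_step (w : String) (b1 b2 b3 b4 b5 b6 b7 b8 b9 : List String) :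
    (PySem.List.pyRange 1 10 1).foldl
      (fun bs d =>
        if PySem.Str.count w (PySem.Int.toStr d) == 1 then bs.modify (d - 1).toNat (fun b => b ++ [w]) else bs)
      [b1,b2,b3,b4,b5,b6,b7,b8,b9]
    = [b1 ++ (if pvP 1 w then [w] else []), b2 ++ (if pvP 2 w then [w] else []),
       b3 ++ (if pvP 3 w then [w] else []), b4 ++ (if pvP 4 w then [w] else []),
       b5 ++ (if pvP 5 w then [w] else []), b6 ++ (if pvP 6 w then [w] else []),
       b7 ++ (if pvP 7 w then [w] else []), b8 ++ (if pvP 8 w then [w] else []),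
       b9 ++ (if pvP 9 w then [w] else [])] := by
  rw [pvRange_eq]
  simp only [List.foldl_cons, List.foldl_nil, pvIfModify, pvP]
  norm_num [show (2:Int).toNat = 2 from rfl, show (3:Int).toNat = 3 from rfl,
    show (4:Int).toNat = 4 from rfl, show (5:Int).toNat = 5 from rfl,
    show (6:Int).toNat = 6 from rfl, show (7:Int).toNat = 7 from rfl,
    show (8:Int).toNat = 8 from rfl, List.modify, List.modifyTailIdx, List.modifyTailIdx.go]

-- pvSel on a cons, as an append
theorem pvSel_cons (d : Int) (w : String) (ws : List String) :
    pvSel d (w :: ws) = (if pvP d w then [w] else []) ++ pvSel d ws := by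
  simp only [pvSel, List.filter_cons]
  split_ifs <;> simp

-- B's bucket-filling loop, fully characterised
theorem alt_buckets (ws : List String) (b1 b2 b3 b4 b5 b6 b7 b8 b9 : List String) :
    ws.foldl
      (fun bs w => (PySem.List.pyRange 1 10 1).foldl
        (fun bs d =>
          if PySem.Str.count w (PySem.Int.toStr d) == 1 then bs.modify (d - 1).toNat (fun b => b ++ [w]) else bs)
        bs)
      [b1,b2,b3,b4,b5,b6,b7,b8,b9]
    = [b1 ++ pvSel 1 ws, b2 ++ pvSel 2 ws, b3 ++ pvSel 3 ws, b4 ++ pvSel 4 ws,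
       b5 ++ pvSel 5 ws, b6 ++ pvSel 6 ws, b7 ++ pvSel 7 ws, b8 ++ pvSel 8 ws, b9 ++ pvSel 9 ws] := by
  induction ws generalizing b1 b2 b3 b4 b5 b6 b7 b8 b9 with
  | nil => simp [pvSel]
  | cons w ws ih =>
    rw [List.foldl_cons, alt_step, ih]
    simp [pvSel_cons, List.append_assoc]

-- A's accumulation, character level
theorem pvCat_cons_toList (w : String) (ws : List String) :
    (pvCat (w :: ws)).toList = w.toList ++ [' '] ++ (pvCat ws).toList := by
  simp [pvCat]

-- dropping the trailing space of A's accumulation yields the space-join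
theorem dropLast_cat (ls : List String) :
    (pvCat ls).toList.dropLast = PySem.Chars.join [' '] (ls.map String.toList) := by
  induction ls with
  | nil => rw [List.map_nil, PySem.Chars.join_nil]; simp [pvCat]
  | cons a ls ih =>
    cases ls with
    | nil => rw [List.map_cons, List.map_nil, PySem.Chars.join_singleton, pvCat_cons_toList]
             simp [pvCat]
    | cons b rest =>
      rw [List.map_cons, List.map_cons, PySem.Chars.join_cons_cons, pvCat_cons_toList,
          List.dropLast_append_of_ne_nil, ih, List.map_cons]
      rw [pvCat_cons_toList]
      simp

-- ===== VERDICT (by name: the statement is the Claim_ definition above) =====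
theorem order_spec : Claim_equal_order := by
  intro sentence _
  unfold Spec_order
  simp only [order, order_alt]
  apply String.toList_inj.mp
  rw [order_outer, show (List.replicate 9 ([] : List String)) = [[],[],[],[],[],[],[],[],[]] from rfl,
      alt_buckets, pvRange_eq]
  simp only [List.nil_append, List.map_cons, List.map_nil]
  rw [PySem.Str.slice_to_neg_one]
  simp only [String.toList_append, show ("" : String).toList = [] from rfl, List.nil_append]
  rw [dropLast_cat]
  simp [PySem.Str.join]
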